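-- pv_equiv track=rewrite | github.com/RitamSaha001/lalacore-omega | core/math/contextual_math_solver.py | _count_bounded_nonnegative_solutions
-- ===== SOURCE A (Python) =====
-- import math
--
-- def _count_bounded_nonnegative_solutions(total: int, upper_bounds: list[int | None]) -> int:
--     if total < 0:
--         return 0
--     var_count = len(upper_bounds)
--     if var_count == 0:
--         return int(total == 0)
--
--     bounded = [(idx, int(bound)) for idx, bound in enumerate(upper_bounds) if bound is not None]
--     if len(bounded) > 16:
--         return 0
--
--     count = 0
--     for mask in range(1 << len(bounded)):
--         reduction = 0
--         parity = 0
--         for bit, (_, bound) in enumerate(bounded):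
--             if mask & (1 << bit):
--                 reduction += int(bound) + 1
--                 parity += 1
--         remaining = total - reduction
--         if remaining < 0:
--             continue
--         term = math.comb(remaining + var_count - 1, var_count - 1)
--         count += -term if parity % 2 else term
--     return int(count)
-- ===== SOURCE B (Python) =====
-- import math
--
-- def _count_bounded_nonnegative_solutions(total: int, upper_bounds: list[int | None]) -> int:
--     if total < 0:
--         return 0
--     var_count = len(upper_bounds)
--     if var_count == 0:
--         return int(total == 0)
--     bounds = [int(b) for b in upper_bounds if b is not None]
--     if len(bounds) > 16:
--         return 0
--
--     def go(bs, remaining, sign):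
--         if not bs:
--             if remaining < 0:
--                 return 0
--             return sign * math.comb(remaining + var_count - 1, var_count - 1)
--         return go(bs[1:], remaining, sign) + go(bs[1:], remaining - bs[0] - 1, -sign)
--
--     return go(bounds, total, 1)
-- ===== Notes on version B (the rewrite author's own statement) =====
-- stated objective: alternative
-- what changed: A enumerates all 2^k inclusion-exclusion subsets by iterating bitmasks and re-scanning the whole bounded list for every mask; B replaces this with a structural include/exclude recursion over the bounded list that carries the remaining total and sign, with no bit operations, keeping the same >16-bounded-variables cap since the recursion is equally exponential.
import Mathlib
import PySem

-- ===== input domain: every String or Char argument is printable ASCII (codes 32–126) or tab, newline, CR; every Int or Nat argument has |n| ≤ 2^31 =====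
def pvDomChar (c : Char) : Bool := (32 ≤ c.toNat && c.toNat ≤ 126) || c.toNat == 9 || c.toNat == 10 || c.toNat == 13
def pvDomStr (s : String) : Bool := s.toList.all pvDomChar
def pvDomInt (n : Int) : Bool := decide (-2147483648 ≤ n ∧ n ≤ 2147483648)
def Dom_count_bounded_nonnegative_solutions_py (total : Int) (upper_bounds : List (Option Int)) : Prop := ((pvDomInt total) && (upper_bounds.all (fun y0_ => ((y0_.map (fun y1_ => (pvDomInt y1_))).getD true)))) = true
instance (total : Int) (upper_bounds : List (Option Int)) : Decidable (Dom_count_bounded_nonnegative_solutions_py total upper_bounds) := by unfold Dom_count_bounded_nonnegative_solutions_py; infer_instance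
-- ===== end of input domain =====

-- B replaces A's bitmask enumeration of inclusion–exclusion subsets by a structural
-- recursion over the bounded variables (include/exclude branching); objective: alternative.

-- ===== PORT A =====
-- `for mask in range(1 << len(bounded))` enumerates the naturals 0 .. 2^len(bounded)-1;
-- for a nonnegative mask, Python's `mask & (1 << bit) != 0` is exactly `Nat.testBit mask bit`
-- (here `bit = e.1.toNat`, the enumerate index, which is nonnegative). Exact on this domain.
-- `math.comb(n, k)` with n, k ≥ 0 (the case reached here) is `Nat.choose`.
def count_bounded_nonnegative_solutions_py (total : Int) (upper_bounds : List (Option Int)) : Int :=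
  if total < 0 then 0
  else
    let var_count : Int := (upper_bounds.length : Int)
    if upper_bounds.length = 0 then (if total = 0 then 1 else 0)
    else
      let bounded : List (Int × Int) :=
        (PySem.List.enumerate upper_bounds).filterMap
          (fun p => p.2.map (fun b => (p.1, b)))
      if bounded.length > 16 then 0
      else
        (List.range (2 ^ bounded.length)).foldl
          (fun (count : Int) (mask : Nat) =>
            let rp : Int × Int :=
              (PySem.List.enumerate bounded).foldl
                (fun (acc : Int × Int) (e : Int × (Int × Int)) =>
                  if Nat.testBit mask e.1.toNat then (acc.1 + e.2.2 + 1, acc.2 + 1) else acc)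
                (0, 0)
            let remaining := total - rp.1
            if remaining < 0 then count
            else
              let term : Int := (Nat.choose (remaining + var_count - 1).toNat (var_count - 1).toNat : Nat)
              count + (if rp.2 % 2 = 1 then -term else term))
          0

-- ===== PORT B =====
-- B's recursive helper `go`: include/exclude each bounded variable's overflow, leaf does the sign·comb.
def pyGoB (n : Int) (bs : List Int) (remaining : Int) (sign : Int) : Int :=
  match bs with
  | [] => if remaining < 0 then 0 else sign * (Nat.choose (remaining + n - 1).toNat (n - 1).toNat : Nat)
  | b :: rest => pyGoB n rest remaining sign + pyGoB n rest (remaining - b - 1) (-sign)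

def count_bounded_nonnegative_solutions_py_alt (total : Int) (upper_bounds : List (Option Int)) : Int :=
  if total < 0 then 0
  else
    let var_count : Int := (upper_bounds.length : Int)
    if upper_bounds.length = 0 then (if total = 0 then 1 else 0)
    else
      let bounds : List Int := upper_bounds.filterMap id
      if bounds.length > 16 then 0
      else pyGoB var_count bounds total 1

-- ===== PRECONDITION & SPEC =====
def Spec_count_bounded_nonnegative_solutions_py (total : Int) (upper_bounds : List (Option Int)) (out : Int) : Prop := out = count_bounded_nonnegative_solutions_py_alt total upper_bounds
instance (total : Int) (upper_bounds : List (Option Int)) (out : Int) : Decidable (Spec_count_bounded_nonnegative_solutions_py total upper_bounds out) := by unfold Spec_count_bounded_nonnegative_solutions_py; infer_instance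

-- ===== CLAIM (what is proved, stated in full; the proofs are below) =====
def Claim_equal_count_bounded_nonnegative_solutions_py : Prop := ∀ (total : Int) (upper_bounds : List (Option Int)), Dom_count_bounded_nonnegative_solutions_py total upper_bounds → Spec_count_bounded_nonnegative_solutions_py total upper_bounds (count_bounded_nonnegative_solutions_py total upper_bounds)

-- ===== LEMMAS AND PROOFS =====

-- (reduction, parity) of a mask against the bound list, peeling from bit 0.
def redp (mask : Nat) (L : List (Int × Int)) : Int × Int :=
  match L with
  | [] => (0, 0)
  | x :: xs =>
    let r := redp (mask >>> 1) xs
    if mask % 2 = 1 then (r.1 + x.2 + 1, r.2 + 1) else r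

-- A's term for one mask, with an explicit base sign s.
def aterm (n : Int) (L : List (Int × Int)) (total : Int) (s : Int) (mask : Nat) : Int :=
  let rp := redp mask L
  if total - rp.1 < 0 then 0
  else (if rp.2 % 2 = 1 then -s else s) * (Nat.choose (total - rp.1 + n - 1).toNat (n - 1).toNat : Nat)

lemma redp_shift (mask : Nat) (L : List (Int × Int)) (a p : Int) :
    (PySem.List.enumerate L).foldl
      (fun (acc : Int × Int) (e : Int × (Int × Int)) =>
        if Nat.testBit mask e.1.toNat then (acc.1 + e.2.2 + 1, acc.2 + 1) else acc) (a, p)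
    = (a + (redp mask L).1, p + (redp mask L).2) := by
  suffices H : ∀ (L : List (Int × Int)) (k : Nat) (m : Nat) (a p : Int),
      (PySem.List.enumerate L (k : Int)).foldl
        (fun (acc : Int × Int) (e : Int × (Int × Int)) =>
          if Nat.testBit m e.1.toNat then (acc.1 + e.2.2 + 1, acc.2 + 1) else acc) (a, p)
      = (a + (redp (m >>> k) L).1, p + (redp (m >>> k) L).2) by
    simpa using H L 0 mask a p
  intro L
  induction L with
  | nil => intro k m a p; simp [PySem.List.enumerate_nil, redp]
  | cons x xs ih =>
    intro k m a p
    have hk : ((k : Int)).toNat = k := Int.toNat_natCast k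
    have hcast : ((k : Int) + 1) = ((k + 1 : Nat) : Int) := by push_cast; ring
    have hshift : (m >>> k) >>> 1 = m >>> (k + 1) := by simp [Nat.shiftRight_add]
    have htb : m.testBit k = decide ((m >>> k) % 2 = 1) := by
      rw [Nat.testBit_eq_decide_div_mod_eq, Nat.shiftRight_eq_div_pow]
    rcases Nat.mod_two_eq_zero_or_one (m >>> k) with hp | hp
    · have hbit : m.testBit k = false := by simp [htb, hp]
      rw [PySem.List.enumerate_cons, List.foldl_cons]
      simp only [hk, hbit, Bool.false_eq_true, if_false, hcast]
      rw [ih (k + 1) m a p]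
      simp [redp, ← hshift, hp]
    · have hbit : m.testBit k = true := by simp [htb, hp]
      rw [PySem.List.enumerate_cons, List.foldl_cons]
      simp only [hk, hbit, if_true, hcast]
      rw [ih (k + 1) m (a + x.2 + 1) (p + 1)]
      have hr : redp (m >>> k) (x :: xs)
          = ((redp (m >>> (k + 1)) xs).1 + x.2 + 1, (redp (m >>> (k + 1)) xs).2 + 1) := by
        simp [redp, ← hshift, hp]
      rw [hr]
      simp only [Prod.mk.injEq]
      constructor <;> ring

-- the doubling of the mask range: sum over 0..2n-1 = sum of even/odd pairs over 0..n-1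
lemma range_double_sum (f : Nat → Int) (n : Nat) :
    ((List.range (2 * n)).map f).sum
      = ((List.range n).map (fun m => f (2 * m) + f (2 * m + 1))).sum := by
  induction n with
  | zero => simp
  | succ n ih =>
    have h2 : 2 * (n + 1) = (2 * n) + 1 + 1 := by ring
    rw [h2, List.range_succ, List.range_succ, List.range_succ]
    simp [ih]

lemma redp_even (m : Nat) (x : Int × Int) (xs : List (Int × Int)) :
    redp (2 * m) (x :: xs) = redp m xs := by
  have h1 : (2 * m) % 2 = 0 := by omega
  have h2 : (2 * m) >>> 1 = m := by
    rw [Nat.shiftRight_one]; omega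
  simp [redp, h1, h2]

lemma redp_odd (m : Nat) (x : Int × Int) (xs : List (Int × Int)) :
    redp (2 * m + 1) (x :: xs) = ((redp m xs).1 + x.2 + 1, (redp m xs).2 + 1) := by
  have h1 : (2 * m + 1) % 2 = 1 := by omega
  have h2 : (2 * m + 1) >>> 1 = m := by
    rw [Nat.shiftRight_one]; omega
  simp [redp, h1, h2]

-- the key equivalence: A's mask sum equals B's include/exclude recursion
lemma sum_aterm_eq_goB (n : Int) (L : List (Int × Int)) :
    ∀ (total s : Int),
      ((List.range (2 ^ L.length)).map (aterm n L total s)).sum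
        = pyGoB n (L.map (·.2)) total s := by
  induction L with
  | nil =>
    intro total s
    simp [aterm, redp, pyGoB]
  | cons x xs ih =>
    intro total s
    have hlen : 2 ^ (x :: xs).length = 2 * 2 ^ xs.length := by
      simp [List.length_cons, pow_succ]; ring
    rw [hlen, range_double_sum]
    have hpt : ∀ m : Nat,
        aterm n (x :: xs) total s (2 * m) + aterm n (x :: xs) total s (2 * m + 1)
          = aterm n xs total s m + aterm n xs (total - x.2 - 1) (-s) m := by
      intro m
      have he : aterm n (x :: xs) total s (2 * m) = aterm n xs total s m := by
        simp [aterm, redp_even]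
      have ho : aterm n (x :: xs) total s (2 * m + 1) = aterm n xs (total - x.2 - 1) (-s) m := by
        simp only [aterm, redp_odd]
        have harg : total - ((redp m xs).1 + x.2 + 1) = (total - x.2 - 1) - (redp m xs).1 := by ring
        rw [harg]
        by_cases hneg : (total - x.2 - 1) - (redp m xs).1 < 0
        · simp [hneg]
        · by_cases hp : (redp m xs).2 % 2 = 1
          · have h1 : ¬ ((redp m xs).2 + 1) % 2 = 1 := by omega
            simp [hneg, hp, h1]
          · have h1 : ((redp m xs).2 + 1) % 2 = 1 := by omega
            simp [hneg, hp, h1]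
      rw [he, ho]
    calc ((List.range (2 ^ xs.length)).map
            (fun m => aterm n (x :: xs) total s (2 * m) + aterm n (x :: xs) total s (2 * m + 1))).sum
        = ((List.range (2 ^ xs.length)).map
            (fun m => aterm n xs total s m + aterm n xs (total - x.2 - 1) (-s) m)).sum := by
          congr 1; apply List.map_congr_left; intro m _; exact hpt m
      _ = ((List.range (2 ^ xs.length)).map (aterm n xs total s)).sum
            + ((List.range (2 ^ xs.length)).map (aterm n xs (total - x.2 - 1) (-s))).sum := by
          simp [List.sum_map_add]
      _ = pyGoB n (xs.map (·.2)) total s + pyGoB n (xs.map (·.2)) (total - x.2 - 1) (-s) := by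
          rw [ih, ih]
      _ = pyGoB n ((x :: xs).map (·.2)) total s := by
          simp [pyGoB]

-- A's bounded list projects to B's bounds list
lemma bounded_map_snd (xs : List (Option Int)) :
    (((PySem.List.enumerate xs).filterMap (fun p => p.2.map (fun b => (p.1, b)))).map (·.2))
      = xs.filterMap id := by
  suffices H : ∀ (xs : List (Option Int)) (s : Int),
      (((PySem.List.enumerate xs s).filterMap (fun p => p.2.map (fun b => (p.1, b)))).map (·.2))
        = xs.filterMap id by
    exact H xs 0
  intro xs
  induction xs with
  | nil => intro s; simp [PySem.List.enumerate_nil]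
  | cons x xs ih =>
    intro s
    cases x <;> simp [PySem.List.enumerate_cons, ih (s + 1)]

lemma bounded_length (xs : List (Option Int)) :
    ((PySem.List.enumerate xs).filterMap (fun p => p.2.map (fun b => (p.1, b)))).length
      = (xs.filterMap id).length := by
  have := congrArg List.length (bounded_map_snd xs)
  simpa using this

-- A's foldl accumulates exactly the aterm sum
lemma foldl_aterm (n total : Int) (L : List (Int × Int)) :
    (List.range (2 ^ L.length)).foldl
      (fun (count : Int) (mask : Nat) =>
        let rp : Int × Int :=
          (PySem.List.enumerate L).foldl
            (fun (acc : Int × Int) (e : Int × (Int × Int)) =>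
              if Nat.testBit mask e.1.toNat then (acc.1 + e.2.2 + 1, acc.2 + 1) else acc)
            (0, 0)
        let remaining := total - rp.1
        if remaining < 0 then count
        else
          let term : Int := (Nat.choose (remaining + n - 1).toNat (n - 1).toNat : Nat)
          count + (if rp.2 % 2 = 1 then -term else term))
      0
    = ((List.range (2 ^ L.length)).map (aterm n L total 1)).sum := by
  have hfun : ∀ (count : Int) (mask : Nat),
      (let rp : Int × Int :=
          (PySem.List.enumerate L).foldl
            (fun (acc : Int × Int) (e : Int × (Int × Int)) =>
              if Nat.testBit mask e.1.toNat then (acc.1 + e.2.2 + 1, acc.2 + 1) else acc)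
            (0, 0)
        let remaining := total - rp.1
        if remaining < 0 then count
        else
          let term : Int := (Nat.choose (remaining + n - 1).toNat (n - 1).toNat : Nat)
          count + (if rp.2 % 2 = 1 then -term else term))
      = count + aterm n L total 1 mask := by
    intro count mask
    have hrp := redp_shift mask L 0 0
    simp only [zero_add] at hrp
    simp only [hrp, aterm]
    by_cases hneg : total - (redp mask L).1 < 0
    · simp [hneg]
    · by_cases hp : (redp mask L).2 % 2 = 1 <;> simp [hneg, hp]
  calc (List.range (2 ^ L.length)).foldl _ 0
      = (List.range (2 ^ L.length)).foldl (fun count mask => count + aterm n L total 1 mask) 0 := by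
        apply List.foldl_ext
        intro a b _; exact hfun a b
    _ = ((List.range (2 ^ L.length)).map (aterm n L total 1)).sum := by
        rw [PySem.List.foldl_add]; simp

-- ===== VERDICT (by name: the statement is the Claim_ definition above) =====
theorem count_bounded_nonnegative_solutions_py_spec : Claim_equal_count_bounded_nonnegative_solutions_py := by
  intro total upper_bounds _
  unfold Spec_count_bounded_nonnegative_solutions_py
  unfold count_bounded_nonnegative_solutions_py count_bounded_nonnegative_solutions_py_alt
  by_cases h0 : total < 0
  · simp [h0]
  · simp only [h0, if_false]
    by_cases h1 : upper_bounds.length = 0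
    · simp [h1]
    · simp only [h1, if_false]
      rw [foldl_aterm, sum_aterm_eq_goB, bounded_map_snd, bounded_length]
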